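-- pv_equiv track=rewrite | github.com/LucaMica02/AlgorithmsCourseSapienza | Dynamic_Programming/Dynamic_Programming_Exercises.py | countBinaryStrings2
-- ===== SOURCE A (Python) =====
-- def countBinaryStrings2(n):
--     T = [0] * (n+1)
--     if n == 0: return 1
--     if n == 1: return 2
--     if n == 2: return 4
--     T[0], T[1], T[2] = 1, 2, 4
--     #IDEA T[i]:
--     # the strings to be counted in the T[i-1] in which i can add '1' +
--     # the strings to be counted in the T[i-2] in which i can add '10' +
--     # the strings to be counted in the T[i-3] in which i can add '100'
--     for i in range(3, n+1):
--         T[i] = T[i-1] + T[i-2] + T[i-3]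
--     return T[n]
-- ===== SOURCE B (Python) =====
-- # Matrix exponentiation of the 3x3 tribonacci recurrence: O(log n) instead of O(n).
-- def _mat_mult(A, B):
--     (a, b, c), (d, e, f), (g, h, i) = A
--     (p, q, r), (s, t, u), (v, w, x) = B
--     return ((a*p + b*s + c*v, a*q + b*t + c*w, a*r + b*u + c*x),
--             (d*p + e*s + f*v, d*q + e*t + f*w, d*r + e*u + f*x),
--             (g*p + h*s + i*v, g*q + h*t + i*w, g*r + h*u + i*x))
--
-- def _mat_pow(M, e):
--     result = ((1, 0, 0), (0, 1, 0), (0, 0, 1))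
--     base = M
--     while e > 0:
--         if e % 2 == 1:
--             result = _mat_mult(result, base)
--         base = _mat_mult(base, base)
--         e //= 2
--     return result
--
-- def countBinaryStrings2(n):
--     if n == 0: return 1
--     if n == 1: return 2
--     if n == 2: return 4
--     M = ((1, 1, 1), (1, 0, 0), (0, 1, 0))
--     P = _mat_pow(M, n - 2)
--     # P applied to the seed vector (T[2], T[1], T[0]) = (4, 2, 1); first row gives T[n]
--     return P[0][0] * 4 + P[0][1] * 2 + P[0][2] * 1
-- ===== Notes on version B (the rewrite author's own statement) =====
-- stated objective: faster
-- what changed: Replaces the O(n) DP table fill with binary exponentiation of the 3x3 companion matrix of the tribonacci-like recurrence, O(log n) arithmetic steps.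
import Mathlib
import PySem

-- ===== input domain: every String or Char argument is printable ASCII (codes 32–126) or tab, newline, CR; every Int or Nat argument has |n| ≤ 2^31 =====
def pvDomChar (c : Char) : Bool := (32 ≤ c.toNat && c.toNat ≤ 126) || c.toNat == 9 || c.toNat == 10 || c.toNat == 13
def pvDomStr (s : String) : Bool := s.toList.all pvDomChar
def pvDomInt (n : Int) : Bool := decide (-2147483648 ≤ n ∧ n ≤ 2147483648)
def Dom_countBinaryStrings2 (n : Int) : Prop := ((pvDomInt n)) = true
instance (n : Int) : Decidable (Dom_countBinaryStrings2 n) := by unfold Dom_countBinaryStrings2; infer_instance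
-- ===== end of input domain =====

-- B replaces A's O(n) DP-table fill by binary exponentiation of the 3x3 companion matrix (objective: faster).

-- ===== PORT A =====
-- Literal port of A's table-filling loop. All list indices used by the code are
-- nonnegative on Pre_ (0 ≤ n): the loop runs i = 3..n, so .toNat and the default 0 of
-- pyGetD are never the out-of-range case; for n < 0 Python raises IndexError at T[n]
-- (the list is empty), which Pre_ excludes.
def countBinaryStrings2 (n : Int) : Int :=
  let T : List Int := List.replicate (n + 1).toNat 0
  if n = 0 then 1
  else if n = 1 then 2
  else if n = 2 then 4
  else
    let T := ((T.set 0 1).set 1 2).set 2 4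
    let T := (PySem.List.pyRange 3 (n + 1) 1).foldl
      (fun T i =>
        T.set i.toNat
          (PySem.List.pyGetD T (i - 1) 0 + PySem.List.pyGetD T (i - 2) 0 +
            PySem.List.pyGetD T (i - 3) 0)) T
    PySem.List.pyGetD T n 0

-- ===== PORT B =====
-- 3x3 integer matrix as a tuple of rows, as in Source B.
abbrev PVMat3 : Type := (Int × Int × Int) × (Int × Int × Int) × (Int × Int × Int)

def pvMatMult (A B : PVMat3) : PVMat3 :=
  match A, B with
  | ((a, b, c), (d, e, f), (g, h, i)), ((p, q, r), (s, t, u), (v, w, x)) =>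
    ((a*p + b*s + c*v, a*q + b*t + c*w, a*r + b*u + c*x),
     (d*p + e*s + f*v, d*q + e*t + f*w, d*r + e*u + f*x),
     (g*p + h*s + i*v, g*q + h*t + i*w, g*r + h*u + i*x))

-- the 'while e > 0' loop of _mat_pow, state (result, base, e)
def pvMatPowLoop (result base : PVMat3) (e : Int) : PVMat3 :=
  if _h : e ≤ 0 then result
  else
    pvMatPowLoop (if PySem.Int.mod e 2 = 1 then pvMatMult result base else result)
      (pvMatMult base base) (PySem.Int.floordiv e 2)
termination_by e.toNat
decreasing_by simp only [PySem.Int.floordiv, Int.fdiv_eq_ediv]; omega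

def pvMatPow (M : PVMat3) (e : Int) : PVMat3 :=
  pvMatPowLoop ((1, 0, 0), (0, 1, 0), (0, 0, 1)) M e

def countBinaryStrings2_alt (n : Int) : Int :=
  if n = 0 then 1
  else if n = 1 then 2
  else if n = 2 then 4
  else
    let M : PVMat3 := ((1, 1, 1), (1, 0, 0), (0, 1, 0))
    let P := pvMatPow M (n - 2)
    P.1.1 * 4 + P.1.2.1 * 2 + P.1.2.2 * 1

-- ===== PRECONDITION & SPEC =====
-- Pre_ excludes exactly n < 0, where Python A raises IndexError (T is the empty list there).
def Pre_countBinaryStrings2 (n : Int) : Prop := 0 ≤ n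
instance (n : Int) : Decidable (Pre_countBinaryStrings2 n) := by
  unfold Pre_countBinaryStrings2; infer_instance

def pvWitness_countBinaryStrings2 : Int := 5

def Spec_countBinaryStrings2 (n : Int) (out : Int) : Prop := out = countBinaryStrings2_alt n
instance (n : Int) (out : Int) : Decidable (Spec_countBinaryStrings2 n out) := by
  unfold Spec_countBinaryStrings2; infer_instance

-- ===== CLAIM (what is proved, stated in full; the proofs are below) =====
def Claim_equal_countBinaryStrings2 : Prop :=
  ∀ (n : Int), Dom_countBinaryStrings2 n → Pre_countBinaryStrings2 n →
    Spec_countBinaryStrings2 n (countBinaryStrings2 n)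

-- ===== LEMMAS AND PROOFS =====

-- the recurrence both programs compute
def pvTrib : Nat → Int
  | 0 => 1
  | 1 => 2
  | 2 => 4
  | k + 3 => pvTrib (k + 2) + pvTrib (k + 1) + pvTrib k

def pvMatI : PVMat3 := ((1, 0, 0), (0, 1, 0), (0, 0, 1))

def pvMatNPow (b : PVMat3) : Nat → PVMat3
  | 0 => pvMatI
  | k + 1 => pvMatMult b (pvMatNPow b k)

theorem pvMatMult_assoc (A B C : PVMat3) :
    pvMatMult (pvMatMult A B) C = pvMatMult A (pvMatMult B C) := by
  obtain ⟨⟨a, b, c⟩, ⟨d, e, f⟩, ⟨g, h, i⟩⟩ := A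
  obtain ⟨⟨p, q, r⟩, ⟨s, t, u⟩, ⟨v, w, x⟩⟩ := B
  obtain ⟨⟨a2, b2, c2⟩, ⟨d2, e2, f2⟩, ⟨g2, h2, i2⟩⟩ := C
  simp only [pvMatMult, Prod.mk.injEq]
  and_intros <;> ring

theorem pvMatMult_one (A : PVMat3) : pvMatMult A pvMatI = A := by
  obtain ⟨⟨a, b, c⟩, ⟨d, e, f⟩, ⟨g, h, i⟩⟩ := A
  simp only [pvMatMult, pvMatI, Prod.mk.injEq]
  and_intros <;> ring

theorem pvMatOne_mult (A : PVMat3) : pvMatMult pvMatI A = A := by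
  obtain ⟨⟨a, b, c⟩, ⟨d, e, f⟩, ⟨g, h, i⟩⟩ := A
  simp only [pvMatMult, pvMatI, Prod.mk.injEq]
  and_intros <;> ring

theorem pvMatNPow_sq (b : PVMat3) (k : Nat) :
    pvMatNPow (pvMatMult b b) k = pvMatNPow b (2 * k) := by
  induction k with
  | zero => rfl
  | succ k ih =>
    have h2 : 2 * (k + 1) = (2 * k) + 1 + 1 := by omega
    rw [h2]
    simp only [pvMatNPow, ih]
    rw [← pvMatMult_assoc]

theorem pvMatPowLoop_eq (fuel : Nat) :
    ∀ (e : Int), e.toNat ≤ fuel → ∀ (r b : PVMat3),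
      pvMatPowLoop r b e = pvMatMult r (pvMatNPow b e.toNat) := by
  induction fuel with
  | zero =>
    intro e he r b
    have h0 : e ≤ 0 := by omega
    rw [pvMatPowLoop, dif_pos h0]
    have : e.toNat = 0 := by omega
    rw [this]
    simp [pvMatNPow, pvMatMult_one]
  | succ fuel ih =>
    intro e he r b
    by_cases h0 : e ≤ 0
    · rw [pvMatPowLoop, dif_pos h0]
      have : e.toNat = 0 := by omega
      rw [this]
      simp [pvMatNPow, pvMatMult_one]
    · rw [pvMatPowLoop, dif_neg h0]
      have hq : PySem.Int.floordiv e 2 = e / 2 := by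
        simp [PySem.Int.floordiv, Int.fdiv_eq_ediv]
      have hm : PySem.Int.mod e 2 = e % 2 := by
        simp [PySem.Int.mod, Int.fmod_eq_emod]
      have hlt : (PySem.Int.floordiv e 2).toNat ≤ fuel := by rw [hq]; omega
      rw [ih _ hlt]
      rw [pvMatNPow_sq, hm, hq]
      by_cases hodd : e % 2 = 1
      · rw [if_pos hodd]
        have h2 : 2 * (e / 2).toNat + 1 = e.toNat := by omega
        rw [pvMatMult_assoc, ← h2,
          show pvMatNPow b (2 * (e / 2).toNat + 1) =
            pvMatMult b (pvMatNPow b (2 * (e / 2).toNat)) from rfl]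
      · rw [if_neg hodd]
        have h2 : 2 * (e / 2).toNat = e.toNat := by omega
        rw [h2]

-- first-row action of a matrix on the seed column vector
def pvApply3 (P : PVMat3) (v : Int × Int × Int) : Int × Int × Int :=
  (P.1.1 * v.1 + P.1.2.1 * v.2.1 + P.1.2.2 * v.2.2,
   P.2.1.1 * v.1 + P.2.1.2.1 * v.2.1 + P.2.1.2.2 * v.2.2,
   P.2.2.1 * v.1 + P.2.2.2.1 * v.2.1 + P.2.2.2.2 * v.2.2)

theorem pvApply3_mult (A B : PVMat3) (v : Int × Int × Int) :
    pvApply3 (pvMatMult A B) v = pvApply3 A (pvApply3 B v) := by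
  obtain ⟨⟨a, b, c⟩, ⟨d, e, f⟩, ⟨g, h, i⟩⟩ := A
  obtain ⟨⟨p, q, r⟩, ⟨s, t, u⟩, ⟨v1, w, x⟩⟩ := B
  obtain ⟨y1, y2, y3⟩ := v
  simp only [pvApply3, pvMatMult, Prod.mk.injEq]
  and_intros <;> ring

theorem pvMatNPow_apply (k : Nat) :
    pvApply3 (pvMatNPow ((1, 1, 1), (1, 0, 0), (0, 1, 0)) k) (4, 2, 1) =
      (pvTrib (k + 2), pvTrib (k + 1), pvTrib k) := by
  induction k with
  | zero => simp [pvMatNPow, pvMatI, pvApply3, pvTrib]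
  | succ k ih =>
    simp only [pvMatNPow, pvApply3_mult, ih]
    show _ = (pvTrib (k + 3), pvTrib (k + 2), pvTrib (k + 1))
    simp only [pvApply3, pvTrib]
    refine Prod.ext ?_ (Prod.ext ?_ ?_) <;> simp

theorem alt_eq_trib (n : Int) (hn : 0 ≤ n) :
    countBinaryStrings2_alt n = pvTrib n.toNat := by
  unfold countBinaryStrings2_alt
  by_cases h0 : n = 0
  · simp [h0, pvTrib]
  by_cases h1 : n = 1
  · simp [h1, pvTrib]
  by_cases h2 : n = 2
  · simp [h2, pvTrib]
  rw [if_neg h0, if_neg h1, if_neg h2]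
  have h3 : 3 ≤ n := by omega
  have hpow := pvMatPowLoop_eq (n - 2).toNat (n - 2) (le_refl _)
    pvMatI ((1, 1, 1), (1, 0, 0), (0, 1, 0))
  simp only [pvMatPow]
  have hI : pvMatPowLoop ((1, 0, 0), (0, 1, 0), (0, 0, 1))
      ((1, 1, 1), (1, 0, 0), (0, 1, 0)) (n - 2) =
      pvMatNPow ((1, 1, 1), (1, 0, 0), (0, 1, 0)) (n - 2).toNat := by
    rw [show (((1:Int), (0:Int), (0:Int)), ((0:Int), (1:Int), (0:Int)),
      ((0:Int), (0:Int), (1:Int))) = pvMatI from rfl, hpow, pvMatOne_mult]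
  rw [hI]
  have happ := pvMatNPow_apply (n - 2).toNat
  have hfst : (pvApply3 (pvMatNPow ((1, 1, 1), (1, 0, 0), (0, 1, 0)) (n - 2).toNat)
      (4, 2, 1)).1 = pvTrib ((n - 2).toNat + 2) := by rw [happ]
  have hdef : (pvApply3 (pvMatNPow ((1, 1, 1), (1, 0, 0), (0, 1, 0)) (n - 2).toNat)
      (4, 2, 1)).1 =
      (pvMatNPow ((1, 1, 1), (1, 0, 0), (0, 1, 0)) (n - 2).toNat).1.1 * 4 +
      (pvMatNPow ((1, 1, 1), (1, 0, 0), (0, 1, 0)) (n - 2).toNat).1.2.1 * 2 +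
      (pvMatNPow ((1, 1, 1), (1, 0, 0), (0, 1, 0)) (n - 2).toNat).1.2.2 * 1 := rfl
  have hidx : (n - 2).toNat + 2 = n.toNat := by omega
  rw [← hdef, hfst, hidx]

-- A-side: the loop invariant
def pvInv (len : Nat) (L : List Int) (m : Nat) : Prop :=
  L.length = len ∧ ∀ j : Nat, j ≤ m → L.getD j 0 = pvTrib j

theorem a_loop_inv (n : Int) (h3 : 3 ≤ n) (k : Nat) (hk : 3 + (k : Int) ≤ n + 1) :
    pvInv (n + 1).toNat
      ((PySem.List.pyRange 3 (3 + (k : Int)) 1).foldl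
        (fun T i =>
          T.set i.toNat
            (PySem.List.pyGetD T (i - 1) 0 + PySem.List.pyGetD T (i - 2) 0 +
              PySem.List.pyGetD T (i - 3) 0))
        ((((List.replicate (n + 1).toNat 0).set 0 1).set 1 2).set 2 4))
      (2 + k) := by
  induction k with
  | zero =>
    rw [show (3 : Int) + ((0 : Nat) : Int) = 3 by norm_num,
      PySem.List.pyRange_one_eq_nil (le_refl 3)]
    simp only [List.foldl_nil]
    constructor
    · simp
    · intro j hj
      interval_cases j
      · simp only [List.getD]
        rw [List.getElem?_set_ne (by omega : (2 : Nat) ≠ 0),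
          List.getElem?_set_ne (by omega : (1 : Nat) ≠ 0),
          List.getElem?_set_self (by simp; omega)]
        simp [pvTrib]
      · simp only [List.getD]
        rw [List.getElem?_set_ne (by omega : (2 : Nat) ≠ 1),
          List.getElem?_set_self (by simp; omega)]
        simp [pvTrib]
      · simp only [List.getD]
        rw [List.getElem?_set_self (by simp; omega)]
        simp [pvTrib]
  | succ k ih =>
    have hk' : 3 + (k : Int) ≤ n + 1 := by push_cast at hk ⊢; omega
    have ihk := ih hk'
    set L : List Int := (PySem.List.pyRange 3 (3 + (k : Int)) 1).foldl
        (fun T i =>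
          T.set i.toNat
            (PySem.List.pyGetD T (i - 1) 0 + PySem.List.pyGetD T (i - 2) 0 +
              PySem.List.pyGetD T (i - 3) 0))
        ((((List.replicate (n + 1).toNat 0).set 0 1).set 1 2).set 2 4) with hL
    have hsplit : PySem.List.pyRange 3 (3 + ((k + 1 : Nat) : Int)) 1 =
        PySem.List.pyRange 3 (3 + (k : Int)) 1 ++ [3 + (k : Int)] := by
      rw [show (3 : Int) + ((k + 1 : Nat) : Int) = (3 + (k : Int)) + 1 by push_cast; ring]
      exact PySem.List.pyRange_one_succ_right (by omega)
    rw [hsplit, List.foldl_append, ← hL]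
    simp only [List.foldl_cons, List.foldl_nil]
    obtain ⟨hlen, hval⟩ := ihk
    have hi : ((3 : Int) + (k : Int)).toNat = 3 + k := by omega
    have hi1 : ((3 : Int) + (k : Int) - 1) = ((2 + k : Nat) : Int) := by push_cast; ring
    have hi2 : ((3 : Int) + (k : Int) - 2) = ((1 + k : Nat) : Int) := by push_cast; ring
    have hi3 : ((3 : Int) + (k : Int) - 3) = ((k : Nat) : Int) := by ring
    have hget : ∀ (m : Nat), m ≤ 2 + k →
        PySem.List.pyGetD L ((m : Nat) : Int) 0 = pvTrib m := by
      intro m hm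
      rw [PySem.List.pyGetD_of_nonneg _ _ (by positivity)]
      simp only [Int.toNat_natCast]
      exact hval m hm
    have hnew : PySem.List.pyGetD L (3 + (k : Int) - 1) 0 +
        PySem.List.pyGetD L (3 + (k : Int) - 2) 0 +
        PySem.List.pyGetD L (3 + (k : Int) - 3) 0 = pvTrib (k + 3) := by
      rw [hi1, hi2, hi3, hget _ (le_refl _), hget _ (by omega), hget _ (by omega)]
      show pvTrib (2 + k) + pvTrib (1 + k) + pvTrib k = _
      rw [show 2 + k = k + 2 by omega, show 1 + k = k + 1 by omega, pvTrib]
    rw [hnew, hi]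
    constructor
    · simp [hlen]
    · intro j hj
      have hjlen : 3 + k < L.length := by omega
      by_cases hje : j = 3 + k
      · subst hje
        simp [List.getD, List.getElem?_set_self hjlen,
          show k + 3 = 3 + k from by omega]
      · have hj' : j ≤ 2 + k := by omega
        simp only [List.getD, List.getElem?_set_ne (fun h => hje h.symm)]
        exact hval j hj'

theorem a_eq_trib (n : Int) (hn : 0 ≤ n) :
    countBinaryStrings2 n = pvTrib n.toNat := by
  unfold countBinaryStrings2
  by_cases h0 : n = 0
  · simp [h0, pvTrib]
  by_cases h1 : n = 1
  · simp [h1, pvTrib]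
  by_cases h2 : n = 2
  · simp [h2, pvTrib]
  rw [if_neg h0, if_neg h1, if_neg h2]
  have h3 : 3 ≤ n := by omega
  have hk : (3 : Int) + ((n - 2).toNat : Int) = n + 1 := by omega
  have hinv := a_loop_inv n h3 (n - 2).toNat (by omega)
  rw [hk] at hinv
  obtain ⟨hlen, hval⟩ := hinv
  rw [PySem.List.pyGetD_of_nonneg _ _ hn]
  have : n.toNat ≤ 2 + (n - 2).toNat := by omega
  rw [hval n.toNat this]

-- ===== VERDICT (by name: the statement is the Claim_ definition above) =====
theorem countBinaryStrings2_spec : Claim_equal_countBinaryStrings2 := by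
  intro n _ hpre
  unfold Spec_countBinaryStrings2
  rw [a_eq_trib n hpre, alt_eq_trib n hpre]
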